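-- pv_equiv track=rewrite | github.com/shandley/research30 | research30/scripts/lib/cluster.py | _count_word_matches
-- ===== SOURCE A (Python) =====
-- from typing import Dict, List, Optional, Set, Tuple
--
-- def _words_match(word_a: str, word_b: str) -> bool:
--     """Check if two words match, allowing morphological variation.
--
--     Handles cases like gene/genetic, edit/editing, engineer/engineering.
--     Words match if one is a prefix of the other (min 4 shared chars).
--     """
--     if word_a == word_b:
--         return True
--     min_len = min(len(word_a), len(word_b))
--     if min_len < 4:
--         return False
--     # Check if shorter word is a prefix of longer word
--     shorter, longer = (word_a, word_b) if len(word_a) <= len(word_b) else (word_b, word_a)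
--     return longer.startswith(shorter)
--
-- def _count_word_matches(words_to_find: Set[str], words_to_search: Set[str]) -> int:
--     """Count how many words_to_find have a match in words_to_search.
--
--     Uses fuzzy prefix matching via _words_match.
--     """
--     count = 0
--     for target in words_to_find:
--         for candidate in words_to_search:
--             if _words_match(target, candidate):
--                 count += 1
--                 break
--     return count
-- ===== SOURCE B (Python) =====
-- def _count_word_matches(words_to_find, words_to_search):
--     """Index the search words once (exact words, all length>=4 prefixes of them,
--     and the length>=4 words themselves), then answer each target with set lookups."""
--     exact = set(words_to_search)
--     prefixes = set()
--     long_words = set()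
--     for w in words_to_search:
--         if len(w) >= 4:
--             long_words.add(w)
--             for k in range(4, len(w) + 1):
--                 prefixes.add(w[:k])
--     count = 0
--     for t in words_to_find:
--         if t in exact or (len(t) >= 4 and
--                           (t in prefixes or
--                            any(t[:k] in long_words for k in range(4, len(t))))):
--             count += 1
--     return count
-- ===== Notes on version B (the rewrite author's own statement) =====
-- stated objective: faster
-- what changed: Replaces A's all-pairs scan (every target tested against every search word with _words_match) by a one-pass index of the search words (a set of the exact words, a set of all their length>=4 prefixes, and a set of the length>=4 words), answering each target with O(len(target)) set lookups over its own prefixes.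
import Mathlib
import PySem

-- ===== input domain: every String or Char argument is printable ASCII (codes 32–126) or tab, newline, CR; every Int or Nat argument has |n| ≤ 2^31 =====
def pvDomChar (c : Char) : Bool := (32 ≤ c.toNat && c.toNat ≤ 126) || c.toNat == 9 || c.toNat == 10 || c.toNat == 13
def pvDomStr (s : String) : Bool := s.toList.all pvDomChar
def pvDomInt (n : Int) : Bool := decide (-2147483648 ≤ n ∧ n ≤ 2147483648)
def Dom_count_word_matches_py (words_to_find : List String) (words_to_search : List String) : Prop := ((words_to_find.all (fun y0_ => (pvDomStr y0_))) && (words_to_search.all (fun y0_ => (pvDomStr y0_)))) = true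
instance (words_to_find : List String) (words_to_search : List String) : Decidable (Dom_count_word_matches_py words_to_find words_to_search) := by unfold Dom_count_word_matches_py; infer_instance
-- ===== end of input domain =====

-- B replaces A's all-pairs fuzzy scan by a one-pass index of the search words
-- (exact words, their length>=4 prefixes, and the length>=4 words themselves),
-- answering each target with set lookups over its own prefixes (objective: faster).


-- ===== PORT A =====
-- _words_match, transliterated
def pvWordsMatch (word_a : String) (word_b : String) : Bool :=
  if word_a == word_b then true
  else
    let min_len := min (PySem.Str.len word_a) (PySem.Str.len word_b)
    if min_len < 4 then false
    else
      let sl := if PySem.Str.len word_a ≤ PySem.Str.len word_b then (word_a, word_b)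
                else (word_b, word_a)
      PySem.Str.startswith sl.2 sl.1

-- A's inner 'for candidate … if match: count += 1; break' as structural recursion:
-- contribution of one target (1 on the first match, else 0)
def pvInnerA (target : String) : List String → Int
  | [] => 0
  | candidate :: rest => if pvWordsMatch target candidate then 1 else pvInnerA target rest

def count_word_matches_py (words_to_find : List String) (words_to_search : List String) : Int :=
  words_to_find.foldl (fun count target => count + pvInnerA target words_to_search) 0

-- ===== PORT B =====
-- inner 'for k in range(4, len(w)+1): prefixes.add(w[:k])'
def pvAddPrefixes (prefixes : PySem.Set String) (w : String) : PySem.Set String :=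
  (PySem.List.pyRange 4 (PySem.Str.len w + 1)).foldl
    (fun p k => PySem.Set.add p (PySem.Str.slice w none (some k))) prefixes

-- one step of B's indexing pass over words_to_search (state = (prefixes, long_words))
def pvIndexStep (st : PySem.Set String × PySem.Set String) (w : String) :
    PySem.Set String × PySem.Set String :=
  if 4 ≤ PySem.Str.len w then (pvAddPrefixes st.1 w, PySem.Set.add st.2 w) else st

def count_word_matches_py_alt (words_to_find : List String) (words_to_search : List String) : Int :=
  let exact := PySem.Set.ofList words_to_search
  let sets := words_to_search.foldl pvIndexStep (PySem.Set.empty, PySem.Set.empty)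
  words_to_find.foldl (fun count t =>
    if PySem.Set.contains exact t
       || (decide (4 ≤ PySem.Str.len t)
           && (PySem.Set.contains sets.1 t
               || (PySem.List.pyRange 4 (PySem.Str.len t)).any
                    (fun k => PySem.Set.contains sets.2 (PySem.Str.slice t none (some k)))))
    then count + 1 else count) 0

-- ===== PRECONDITION & SPEC =====
def Spec_count_word_matches_py (words_to_find : List String) (words_to_search : List String) (out : Int) : Prop := out = count_word_matches_py_alt words_to_find words_to_search
instance (words_to_find : List String) (words_to_search : List String) (out : Int) : Decidable (Spec_count_word_matches_py words_to_find words_to_search out) := by unfold Spec_count_word_matches_py; infer_instance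

-- ===== CLAIM (what is proved, stated in full; the proofs are below) =====
def Claim_equal_count_word_matches_py : Prop := ∀ (words_to_find : List String) (words_to_search : List String), Dom_count_word_matches_py words_to_find words_to_search → Spec_count_word_matches_py words_to_find words_to_search (count_word_matches_py words_to_find words_to_search)

-- ===== LEMMAS AND PROOFS =====

-- characterisation of A's fuzzy match
theorem pvWordsMatch_iff (t c : String) :
    pvWordsMatch t c = true ↔
      t = c ∨ (4 ≤ t.toList.length ∧ 4 ≤ c.toList.length ∧
               (t.toList <+: c.toList ∨ c.toList <+: t.toList)) := by
  have hlt : PySem.Str.len t = (t.toList.length : Int) := PySem.Str.len_eq t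
  have hlc : PySem.Str.len c = (c.toList.length : Int) := PySem.Str.len_eq c
  by_cases h : t = c
  · simp [pvWordsMatch, h]
  · by_cases hle : PySem.Str.len t ≤ PySem.Str.len c
    · by_cases h4 : min (PySem.Str.len t) (PySem.Str.len c) < 4
      · simp only [pvWordsMatch, beq_iff_eq, h, if_false, if_pos h4, Bool.false_eq_true, false_iff, false_or]
        rw [hlt, hlc] at h4
        rintro ⟨h4t, h4c, _⟩
        omega
      · simp only [pvWordsMatch, beq_iff_eq, h, if_false, if_neg h4, if_pos hle,
          PySem.Str.startswith_eq, PySem.Chars.startswith_iff, false_or]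
        rw [hlt, hlc] at hle h4
        constructor
        · intro hp
          exact ⟨by omega, by omega, Or.inl hp⟩
        · rintro ⟨_, _, hp | hp⟩
          · exact hp
          · exact (String.toList_inj.mp (hp.eq_of_length
              (le_antisymm hp.length_le (by exact_mod_cast hle)))) ▸ hp
    · by_cases h4 : min (PySem.Str.len t) (PySem.Str.len c) < 4
      · simp only [pvWordsMatch, beq_iff_eq, h, if_false, if_pos h4, Bool.false_eq_true, false_iff, false_or]
        rw [hlt, hlc] at h4
        rintro ⟨h4t, h4c, _⟩
        omega
      · simp only [pvWordsMatch, beq_iff_eq, h, if_false, if_neg h4, if_neg hle,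
          PySem.Str.startswith_eq, PySem.Chars.startswith_iff, false_or]
        rw [hlt, hlc] at hle h4
        constructor
        · intro hp
          exact ⟨by omega, by omega, Or.inr hp⟩
        · rintro ⟨_, _, hp | hp⟩
          · exact absurd hp.length_le (by omega)
          · exact hp

-- A's inner loop finds a match iff some candidate matches
theorem pvInnerA_eq (t : String) (l : List String) :
    pvInnerA t l = if l.any (fun c => pvWordsMatch t c) then 1 else 0 := by
  induction l with
  | nil => rfl
  | cons c rest ih =>
      simp only [pvInnerA, List.any_cons]
      by_cases hm : pvWordsMatch t c = true <;> simp [hm, ih]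

-- membership in a fold of Set.add over a mapped list
theorem mem_foldl_add {β : Type} (g : β → String) (ks : List β) (p : PySem.Set String) (x : String) :
    x ∈ ks.foldl (fun p k => PySem.Set.add p (g k)) p ↔ x ∈ p ∨ ∃ k ∈ ks, x = g k := by
  induction ks generalizing p with
  | nil => simp
  | cons k ks ih =>
      simp only [List.foldl_cons, ih, PySem.Set.mem_add, List.mem_cons]
      constructor
      · rintro ((h | h) | ⟨k', hk', rfl⟩)
        · exact Or.inl h
        · exact Or.inr ⟨k, Or.inl rfl, h⟩
        · exact Or.inr ⟨k', Or.inr hk', rfl⟩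
      · rintro (h | ⟨k', (rfl | hk'), rfl⟩)
        · exact Or.inl (Or.inl h)
        · exact Or.inl (Or.inr rfl)
        · exact Or.inr ⟨k', hk', rfl⟩

-- w[:k] on the list side, for 0 ≤ k
theorem toList_slice_take (w : String) (k : Int) (hk : 0 ≤ k) :
    (PySem.Str.slice w none (some k)).toList = w.toList.take k.toNat := by
  rw [PySem.Str.toList_slice, PySem.Chars.slice_eq_listSlice, PySem.List.slice_to _ hk]

-- membership in the prefix set added for one word
theorem mem_pvAddPrefixes (p : PySem.Set String) (w x : String) :
    x ∈ pvAddPrefixes p w ↔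
      x ∈ p ∨ ∃ k : Nat, 4 ≤ k ∧ k ≤ w.toList.length ∧ x.toList = w.toList.take k := by
  unfold pvAddPrefixes
  rw [mem_foldl_add]
  constructor
  · rintro (h | ⟨k, hk, rfl⟩)
    · exact Or.inl h
    · rw [PySem.List.mem_pyRange_one, PySem.Str.len_eq] at hk
      refine Or.inr ⟨k.toNat, by omega, by omega, ?_⟩
      rw [toList_slice_take _ _ (by omega)]
  · rintro (h | ⟨k, h4, hlen, hx⟩)
    · exact Or.inl h
    · refine Or.inr ⟨(k : Int), ?_, ?_⟩
      · rw [PySem.List.mem_pyRange_one, PySem.Str.len_eq]; omega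
      · apply String.toList_inj.mp
        rw [toList_slice_take _ _ (by omega), hx, Int.toNat_natCast]

-- invariant of B's indexing pass
theorem mem_indexFold (l : List String) (acc : PySem.Set String × PySem.Set String) (x : String) :
    (x ∈ (l.foldl pvIndexStep acc).1 ↔
      x ∈ acc.1 ∨ ∃ w ∈ l, ∃ k : Nat, 4 ≤ k ∧ k ≤ w.toList.length ∧ x.toList = w.toList.take k) ∧
    (x ∈ (l.foldl pvIndexStep acc).2 ↔
      x ∈ acc.2 ∨ (x ∈ l ∧ 4 ≤ x.toList.length)) := by
  induction l generalizing acc with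
  | nil => simp
  | cons w l ih =>
      simp only [List.foldl_cons]
      have hStep1 : x ∈ (pvIndexStep acc w).1 ↔
          x ∈ acc.1 ∨ ∃ k : Nat, 4 ≤ k ∧ k ≤ w.toList.length ∧ x.toList = w.toList.take k := by
        unfold pvIndexStep
        by_cases h4 : 4 ≤ PySem.Str.len w
        · simp only [if_pos h4, mem_pvAddPrefixes]
        · have h4' : ¬ 4 ≤ w.toList.length := by
            rw [PySem.Str.len_eq] at h4; exact_mod_cast h4
          simp only [if_neg h4]
          constructor
          · exact Or.inl
          · rintro (h | ⟨k, hk4, hkl, _⟩)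
            · exact h
            · exact absurd (le_trans hk4 hkl) h4'
      have hStep2 : x ∈ (pvIndexStep acc w).2 ↔
          x ∈ acc.2 ∨ (x = w ∧ 4 ≤ w.toList.length) := by
        unfold pvIndexStep
        by_cases h4 : 4 ≤ PySem.Str.len w
        · have h4' : 4 ≤ w.toList.length := by
            rw [PySem.Str.len_eq] at h4; exact_mod_cast h4
          simp only [if_pos h4, PySem.Set.mem_add]
          constructor
          · rintro (h | rfl)
            · exact Or.inl h
            · exact Or.inr ⟨rfl, h4'⟩
          · rintro (h | ⟨rfl, _⟩)
            · exact Or.inl h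
            · exact Or.inr rfl
        · have h4' : ¬ 4 ≤ w.toList.length := by
            rw [PySem.Str.len_eq] at h4; exact_mod_cast h4
          simp only [if_neg h4]
          constructor
          · exact Or.inl
          · rintro (h | ⟨rfl, hlen⟩)
            · exact h
            · exact absurd hlen h4'
      obtain ⟨ih1, ih2⟩ := ih (pvIndexStep acc w)
      constructor
      · rw [ih1, hStep1]
        constructor
        · rintro ((h | hw) | ⟨w', hw', hk⟩)
          · exact Or.inl h
          · exact Or.inr ⟨w, List.mem_cons_self .., hw⟩
          · exact Or.inr ⟨w', List.mem_cons_of_mem _ hw', hk⟩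
        · rintro (h | ⟨w', hw', hk⟩)
          · exact Or.inl (Or.inl h)
          · rcases List.mem_cons.mp hw' with rfl | hw'
            · exact Or.inl (Or.inr hk)
            · exact Or.inr ⟨w', hw', hk⟩
      · rw [ih2, hStep2]
        constructor
        · rintro ((h | ⟨rfl, hlen⟩) | ⟨hm, hlen⟩)
          · exact Or.inl h
          · exact Or.inr ⟨List.mem_cons_self .., hlen⟩
          · exact Or.inr ⟨List.mem_cons_of_mem _ hm, hlen⟩
        · rintro (h | ⟨hm, hlen⟩)
          · exact Or.inl (Or.inl h)
          · rcases List.mem_cons.mp hm with rfl | hm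
            · exact Or.inl (Or.inr ⟨rfl, hlen⟩)
            · exact Or.inr ⟨hm, hlen⟩

-- B's per-target test equals "some candidate fuzzy-matches"
theorem pvCond_iff (s : List String) (t : String) :
    (PySem.Set.contains (PySem.Set.ofList s) t
       || (decide (4 ≤ PySem.Str.len t)
           && (PySem.Set.contains (s.foldl pvIndexStep (PySem.Set.empty, PySem.Set.empty)).1 t
               || (PySem.List.pyRange 4 (PySem.Str.len t)).any
                    (fun k => PySem.Set.contains
                      (s.foldl pvIndexStep (PySem.Set.empty, PySem.Set.empty)).2
                      (PySem.Str.slice t none (some k)))))) =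
    s.any (fun c => pvWordsMatch t c) := by
  rw [Bool.eq_iff_iff]
  simp only [Bool.or_eq_true, Bool.and_eq_true, decide_eq_true_eq, PySem.Set.contains_iff,
    PySem.Set.mem_ofList, List.any_eq_true, pvWordsMatch_iff, PySem.Str.len_eq]
  constructor
  · rintro (ht | ⟨h4, hP | ⟨k, hk, hL⟩⟩)
    · exact ⟨t, ht, Or.inl rfl⟩
    · rw [(mem_indexFold s (PySem.Set.empty, PySem.Set.empty) t).1] at hP
      rcases hP with h | ⟨w, hw, k, hk4, hkl, htake⟩
      · simp [PySem.Set.empty] at h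
      · refine ⟨w, hw, Or.inr ⟨?_, by omega, Or.inl ?_⟩⟩
        · omega
        · rw [htake]; exact List.take_prefix k w.toList
    · rw [(mem_indexFold s (PySem.Set.empty, PySem.Set.empty) _).2] at hL
      rcases hL with h | ⟨hmem, hlen⟩
      · simp [PySem.Set.empty] at h
      · rw [PySem.List.mem_pyRange_one] at hk
        refine ⟨_, hmem, Or.inr ⟨?_, ?_, Or.inr ?_⟩⟩
        · omega
        · rwa [toList_slice_take _ _ (by omega)] at hlen ⊢
        · rw [toList_slice_take _ _ (by omega)]; exact List.take_prefix _ _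
  · rintro ⟨c, hc, rfl | ⟨h4t, h4c, hp | hp⟩⟩
    · exact Or.inl hc
    · refine Or.inr ⟨by exact_mod_cast h4t, Or.inl ?_⟩
      rw [(mem_indexFold s (PySem.Set.empty, PySem.Set.empty) t).1]
      exact Or.inr ⟨c, hc, t.toList.length, h4t, hp.length_le,
        (List.prefix_iff_eq_take.mp hp)⟩
    · by_cases heq : c.toList.length = t.toList.length
      · exact Or.inl (String.toList_inj.mp (hp.eq_of_length heq) ▸ hc)
      · have hlt : c.toList.length < t.toList.length :=
          lt_of_le_of_ne hp.length_le heq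
        refine Or.inr ⟨by exact_mod_cast (by omega : (4:Int) ≤ t.toList.length), Or.inr ?_⟩
        refine ⟨(c.toList.length : Int), ?_, ?_⟩
        · rw [PySem.List.mem_pyRange_one]; omega
        · rw [(mem_indexFold s (PySem.Set.empty, PySem.Set.empty) _).2]
          refine Or.inr ⟨?_, ?_⟩
          · have : (PySem.Str.slice t none (some (c.toList.length : Int))) = c := by
              apply String.toList_inj.mp
              rw [toList_slice_take _ _ (by omega), Int.toNat_natCast,
                ← List.prefix_iff_eq_take.mp hp]
            rw [this]; exact hc
          · rw [toList_slice_take _ _ (by omega), Int.toNat_natCast,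
              ← List.prefix_iff_eq_take.mp hp]; exact h4c

-- the two outer folds agree
theorem pvFold_eq (f s : List String) (acc : Int) :
    f.foldl (fun count target => count + pvInnerA target s) acc =
    f.foldl (fun count t =>
      if PySem.Set.contains (PySem.Set.ofList s) t
         || (decide (4 ≤ PySem.Str.len t)
             && (PySem.Set.contains (s.foldl pvIndexStep (PySem.Set.empty, PySem.Set.empty)).1 t
                 || (PySem.List.pyRange 4 (PySem.Str.len t)).any
                      (fun k => PySem.Set.contains
                        (s.foldl pvIndexStep (PySem.Set.empty, PySem.Set.empty)).2
                        (PySem.Str.slice t none (some k)))))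
      then count + 1 else count) acc := by
  induction f generalizing acc with
  | nil => rfl
  | cons t f ih =>
      simp only [List.foldl_cons]
      rw [ih]
      congr 1
      rw [pvInnerA_eq, ← pvCond_iff]
      split_ifs <;> omega


-- ===== VERDICT (by name: the statement is the Claim_ definition above) =====
theorem count_word_matches_py_spec : Claim_equal_count_word_matches_py := by
  intro f s _
  unfold Spec_count_word_matches_py count_word_matches_py count_word_matches_py_alt
  exact pvFold_eq f s 0
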